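-- pv_equiv track=rewrite | github.com/harshstava/PlasmoFP_Explorer | plasmoFP_explorer_simple.py | search_multiple_genes
-- ===== SOURCE A (Python) =====
-- def search_multiple_genes(query, gene_index):
--     """Search for multiple genes separated by commas. Returns exact matches only."""
--     # Split by comma and clean up each gene ID
--     gene_ids = [gene_id.strip() for gene_id in query.split(',')]
--
--     results = []
--     for gene_id in gene_ids:
--         if not gene_id:  # Skip empty strings
--             continue
--
--         # Try exact match first
--         if gene_id in gene_index:
--             results.append((gene_id, gene_index[gene_id]))
--         else:
--             # Try case-insensitive exact match
--             found = False
--             for existing_gene_id in gene_index.keys():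
--                 if existing_gene_id.upper() == gene_id.upper():
--                     results.append((existing_gene_id, gene_index[existing_gene_id]))
--                     found = True
--                     break
--
--             # If still not found, try partial matching for this specific gene
--             if not found:
--                 gene_id_upper = gene_id.upper()
--                 for existing_gene_id in gene_index.keys():
--                     if gene_id_upper in existing_gene_id.upper():
--                         results.append((existing_gene_id, gene_index[existing_gene_id]))
--                         found = True
--                         break
--
--     return results
-- ===== SOURCE B (Python) =====
-- def search_multiple_genes(query, gene_index):
--     """Single pass over the index keys per gene id: break on a case-insensitive
--     exact hit, otherwise remember the first substring candidate."""
--     def resolve(gid):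
--         if not gid:
--             return None
--         if gid in gene_index:
--             return (gid, gene_index[gid])
--         g_upper = gid.upper()
--         cand = None
--         for k in gene_index:
--             k_upper = k.upper()
--             if k_upper == g_upper:
--                 return (k, gene_index[k])
--             if cand is None and g_upper in k_upper:
--                 cand = k
--         return (cand, gene_index[cand]) if cand is not None else None
--     results = [resolve(part.strip()) for part in query.split(',')]
--     return [r for r in results if r is not None]
-- ===== Notes on version B (the rewrite author's own statement) =====
-- stated objective: faster
-- what changed: Per gene id, A's two separate scans over the keys (case-insensitive exact, then substring) are replaced by one pass that breaks on a case-insensitive exact hit while remembering the first substring candidate, with resolution factored into a helper feeding a comprehension instead of in-loop appends.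
import Mathlib
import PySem

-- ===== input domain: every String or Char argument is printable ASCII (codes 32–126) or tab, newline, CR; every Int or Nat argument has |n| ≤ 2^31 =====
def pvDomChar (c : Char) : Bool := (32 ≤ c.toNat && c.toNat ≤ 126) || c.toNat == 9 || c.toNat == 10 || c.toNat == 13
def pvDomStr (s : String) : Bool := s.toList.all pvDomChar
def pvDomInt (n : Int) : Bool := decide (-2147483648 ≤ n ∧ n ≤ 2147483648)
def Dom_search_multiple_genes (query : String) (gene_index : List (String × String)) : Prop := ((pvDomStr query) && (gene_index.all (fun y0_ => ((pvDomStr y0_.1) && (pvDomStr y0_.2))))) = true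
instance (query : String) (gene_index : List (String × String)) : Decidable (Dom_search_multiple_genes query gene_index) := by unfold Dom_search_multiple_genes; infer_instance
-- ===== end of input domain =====

-- B resolves each gene id in ONE pass over the keys (break on a case-insensitive exact
-- hit, remember the first substring candidate) instead of A's two separate key scans;
-- objective: constant-factor speedup (one scan, query uppercased once) measured.

-- ===== PORT A =====

-- gene_index[k] (always called after a successful membership/scan, so the default is never used)
def pvVal (g : List (String × String)) (k : String) : String :=
  ((g.find? (fun p => p.1 == k)).map Prod.snd).getD ""

def pvStepA (g : List (String × String)) (acc : List (String × String)) (gid : String) :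
    List (String × String) :=
  if gid = "" then acc
  else if (g.find? (fun p => p.1 == gid)).isSome then acc ++ [(gid, pvVal g gid)]
  else
    -- first scan: case-insensitive exact match, break at the first hit
    match (g.map Prod.fst).find? (fun k => PySem.Str.upper k == PySem.Str.upper gid) with
    | some k => acc ++ [(k, pvVal g k)]
    | none =>
      -- second scan: substring match, break at the first hit
      match (g.map Prod.fst).find?
          (fun k => PySem.Str.isIn (PySem.Str.upper gid) (PySem.Str.upper k)) with
      | some k => acc ++ [(k, pvVal g k)]
      | none => acc

def search_multiple_genes (query : String) (gene_index : List (String × String)) :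
    List (String × String) :=
  (((PySem.Str.split? query ",").getD []).map PySem.Str.strip).foldl (pvStepA gene_index) []

-- ===== PORT B =====

-- one pass over the keys: return at a case-insensitive exact hit, else keep the
-- first substring candidate seen so far
def pvScanB (gU : String) : List String → Option String → Option String
  | [], cand => cand
  | k :: ks, cand =>
    if PySem.Str.upper k == gU then some k
    else pvScanB gU ks
      (if cand.isNone && PySem.Str.isIn gU (PySem.Str.upper k) then some k else cand)

def pvResolveB (g : List (String × String)) (gid : String) : Option (String × String) :=
  if gid = "" then none
  else if (g.find? (fun p => p.1 == gid)).isSome then some (gid, pvVal g gid)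
  else
    match pvScanB (PySem.Str.upper gid) (g.map Prod.fst) none with
    | some k => some (k, pvVal g k)
    | none => none

def search_multiple_genes_alt (query : String) (gene_index : List (String × String)) :
    List (String × String) :=
  ((((PySem.Str.split? query ",").getD []).map PySem.Str.strip).map (pvResolveB gene_index)).filterMap id

-- ===== PRECONDITION & SPEC =====
def Spec_search_multiple_genes (query : String) (gene_index : List (String × String)) (out : List (String × String)) : Prop := out = search_multiple_genes_alt query gene_index
instance (query : String) (gene_index : List (String × String)) (out : List (String × String)) : Decidable (Spec_search_multiple_genes query gene_index out) := by unfold Spec_search_multiple_genes; infer_instance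

-- ===== CLAIM (what is proved, stated in full; the proofs are below) =====
def Claim_equal_search_multiple_genes : Prop := ∀ (query : String) (gene_index : List (String × String)), Dom_search_multiple_genes query gene_index → Spec_search_multiple_genes query gene_index (search_multiple_genes query gene_index)

-- ===== LEMMAS AND PROOFS =====

-- the one-pass scan computes the two-scan tiered result
theorem pvScanB_spec (gU : String) (ks : List String) (cand : Option String) :
    pvScanB gU ks cand =
      match ks.find? (fun k => PySem.Str.upper k == gU) with
      | some k => some k
      | none =>
        match cand with
        | some c => some c
        | none => ks.find? (fun k => PySem.Str.isIn gU (PySem.Str.upper k)) := by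
  induction ks generalizing cand with
  | nil => cases cand <;> simp [pvScanB]
  | cons k ks ih =>
    simp only [pvScanB, List.find?]
    by_cases hci : (PySem.Str.upper k == gU) = true
    · simp [hci]
    · simp only [hci, Bool.false_eq_true, if_false, ih]
      cases hfind : ks.find? (fun k => PySem.Str.upper k == gU) with
      | some k' => simp
      | none =>
        cases cand with
        | some c => simp
        | none =>
          by_cases hsub : PySem.Chars.isIn gU.toList (PySem.Chars.upper k.toList) = true <;>
            simp [hsub]

theorem pvStepA_eq (g : List (String × String)) (acc : List (String × String)) (gid : String) :
    pvStepA g acc gid = acc ++ (pvResolveB g gid).toList := by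
  unfold pvStepA pvResolveB
  rw [pvScanB_spec]
  by_cases h0 : gid = ""
  · simp [h0]
  · simp only [h0, if_false]
    by_cases hex : ((g.find? (fun p => p.1 == gid)).isSome) = true
    · simp [hex]
    · simp only [hex, Bool.false_eq_true, if_false]
      cases hci : (g.map Prod.fst).find? (fun k => PySem.Str.upper k == PySem.Str.upper gid) with
      | some k => simp
      | none =>
        cases hsub : (g.map Prod.fst).find?
            (fun k => PySem.Str.isIn (PySem.Str.upper gid) (PySem.Str.upper k)) with
        | some k => simp
        | none => simp

theorem foldA_eq (g : List (String × String)) (l : List String) (acc : List (String × String)) :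
    l.foldl (pvStepA g) acc = acc ++ (l.map (pvResolveB g)).filterMap id := by
  induction l generalizing acc with
  | nil => simp
  | cons x xs ih =>
    simp only [List.foldl, List.map, List.filterMap, pvStepA_eq, ih]
    cases h : pvResolveB g x <;> simp

-- ===== VERDICT (by name: the statement is the Claim_ definition above) =====
theorem search_multiple_genes_spec : Claim_equal_search_multiple_genes := by
  intro query gene_index _
  unfold Spec_search_multiple_genes search_multiple_genes search_multiple_genes_alt
  rw [foldA_eq]
  simp
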